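-- pv_equiv track=rewrite | github.com/neurostuff/neurometabench | scripts/convert_sleuth_to_nimads.py | parse_reference_convention
-- ===== SOURCE A (Python) =====
-- from typing import Any, Dict, List, Optional, Tuple
--
-- def parse_reference_convention(value: str) -> Tuple[str, str]:
--     """
--     Parse study/analysis names from Sleuth convention text.
--
--     Expected pattern:
--     "Study; Analysis; OptionalTag"
--     """
--     text = str(value or "").strip()
--     if not text:
--         return "", ""
--
--     parts = [part.strip() for part in text.split(";")]
--     study_label = parts[0] if parts else text
--     analysis_label = parts[1] if len(parts) > 1 else ""
--     return study_label, analysis_label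
-- ===== SOURCE B (Python) =====
-- def parse_reference_convention(value):
--     text = str(value or "").strip()
--     if not text:
--         return "", ""
--     study = ""
--     analysis = ""
--     k = 0
--     for ch in text:
--         if ch == ";":
--             k += 1
--             if k > 1:
--                 break
--         elif k == 0:
--             study += ch
--         else:
--             analysis += ch
--     return study.strip(), analysis.strip()
-- ===== Notes on version B (the rewrite author's own statement) =====
-- stated objective: alternative
-- what changed: B replaces A's full split(';') + list-comprehension strip + indexing by a single explicit character loop with a field-counter state machine that accumulates the first two fields directly and breaks at the second delimiter.
import Mathlib
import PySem

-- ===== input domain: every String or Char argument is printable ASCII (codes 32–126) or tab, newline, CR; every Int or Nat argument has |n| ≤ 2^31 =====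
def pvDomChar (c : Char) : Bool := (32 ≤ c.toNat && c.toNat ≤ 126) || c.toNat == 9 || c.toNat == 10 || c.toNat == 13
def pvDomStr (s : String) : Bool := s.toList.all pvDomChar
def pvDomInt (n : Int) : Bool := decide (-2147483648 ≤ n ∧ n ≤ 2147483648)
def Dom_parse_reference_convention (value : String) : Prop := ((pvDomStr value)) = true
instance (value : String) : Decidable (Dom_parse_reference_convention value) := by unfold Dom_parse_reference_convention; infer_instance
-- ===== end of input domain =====

-- B replaces A's split(';')+strip+index by one explicit character loop with a
-- field-counter state machine that accumulates the first two fields and stops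
-- at the second delimiter (alternative decomposition; same value everywhere).

-- ===== PORT A =====
-- text = str(value or "").strip(); empty guard; parts = [p.strip() for p in text.split(";")];
-- study = parts[0] if parts else text; analysis = parts[1] if len(parts) > 1 else "".
def parse_reference_convention (value : String) : String × String :=
  let text := PySem.Str.strip value
  if text = "" then ("", "")
  else
    let parts := ((PySem.Chars.split? text.toList [';']).getD []).map PySem.Chars.strip
    let study_label := match parts with
      | [] => text.toList
      | p :: _ => p
    let analysis_label := if 1 < parts.length then parts.getD 1 [] else []
    (String.mk study_label, String.mk analysis_label)

-- ===== PORT B =====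
-- the explicit for-loop of Source B: state (k, study, analysis); ';' bumps k and
-- breaks once k > 1; other characters append to the field selected by k.
def prcLoop : List Char → Nat → List Char → List Char → List Char × List Char
  | [], _, study, analysis => (study, analysis)
  | c :: rest, k, study, analysis =>
    if c = ';' then
      if 1 < k + 1 then (study, analysis)
      else prcLoop rest (k + 1) study analysis
    else if k = 0 then prcLoop rest k (study ++ [c]) analysis
    else prcLoop rest k study (analysis ++ [c])

def parse_reference_convention_alt (value : String) : String × String :=
  let text := PySem.Str.strip value
  if text = "" then ("", "")
  else
    let p := prcLoop text.toList 0 [] []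
    (String.mk (PySem.Chars.strip p.1), String.mk (PySem.Chars.strip p.2))

-- ===== PRECONDITION & SPEC =====
def Spec_parse_reference_convention (value : String) (out : String × String) : Prop := out = parse_reference_convention_alt value
instance (value : String) (out : String × String) : Decidable (Spec_parse_reference_convention value out) := by unfold Spec_parse_reference_convention; infer_instance

-- ===== CLAIM (what is proved, stated in full; the proofs are below) =====
def Claim_equal_parse_reference_convention : Prop := ∀ (value : String), Dom_parse_reference_convention value → Spec_parse_reference_convention value (parse_reference_convention value)

-- ===== LEMMAS AND PROOFS =====

-- proof-only helper: the "up to the first ';'" decomposition both ports reduce to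
def pyPartitionSemi : List Char → List Char × List Char
  | [] => ([], [])
  | c :: rest =>
    if c = ';' then ([], rest)
    else
      let p := pyPartitionSemi rest
      (c :: p.1, p.2)

theorem go_nil (fuel : Nat) (cur : List Char) (acc : List (List Char)) :
    PySem.Chars.splitOn.go [';'] fuel [] cur acc = (cur.reverse :: acc).reverse := by
  cases fuel <;> simp [PySem.Chars.splitOn.go]

theorem go_step (fuel : Nat) (c : Char) (rest cur : List Char) (acc : List (List Char)) :
    PySem.Chars.splitOn.go [';'] (fuel + 1) (c :: rest) cur acc =
      if c = ';' then PySem.Chars.splitOn.go [';'] fuel rest [] (cur.reverse :: acc)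
      else PySem.Chars.splitOn.go [';'] fuel rest (c :: cur) acc := by
  by_cases hc : c = ';'
  · subst hc; simp [PySem.Chars.splitOn.go]
  · have hb : (';' == c) = false := by simp; exact fun h => hc h.symm
    simp [PySem.Chars.splitOn.go, List.isPrefixOf, hb, hc]

-- splitOn.go is fuel-indexed; with enough fuel the fuel does not matter.
theorem go_fuel_irrel : ∀ (f1 f2 : Nat) (l cur : List Char) (acc : List (List Char)),
    l.length ≤ f1 → l.length ≤ f2 →
    PySem.Chars.splitOn.go [';'] f1 l cur acc = PySem.Chars.splitOn.go [';'] f2 l cur acc := by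
  intro f1
  induction f1 with
  | zero =>
    intro f2 l cur acc h1 _
    have hl : l = [] := List.eq_nil_of_length_eq_zero (Nat.le_zero.mp h1)
    subst hl
    rw [go_nil, go_nil]
  | succ f1 ih =>
    intro f2 l cur acc h1 h2
    cases l with
    | nil => rw [go_nil, go_nil]
    | cons c rest =>
      cases f2 with
      | zero => simp at h2
      | succ f2 =>
        simp only [List.length_cons, Nat.succ_le_succ_iff] at h1 h2
        rw [go_step, go_step]
        by_cases hc : c = ';'
        · rw [if_pos hc, if_pos hc]; exact ih f2 _ _ _ h1 h2
        · rw [if_neg hc, if_neg hc]; exact ih f2 _ _ _ h1 h2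

-- the core split loop characterised through pyPartitionSemi
theorem go_partition : ∀ (fuel : Nat) (l cur : List Char) (acc : List (List Char)),
    l.length ≤ fuel →
    PySem.Chars.splitOn.go [';'] fuel l cur acc =
      acc.reverse ++ (cur.reverse ++ (pyPartitionSemi l).1) ::
        (if ';' ∈ l then PySem.Chars.splitOn (pyPartitionSemi l).2 [';'] else []) := by
  intro fuel
  induction fuel with
  | zero =>
    intro l cur acc h
    have hl : l = [] := List.eq_nil_of_length_eq_zero (Nat.le_zero.mp h)
    subst hl
    rw [go_nil]; simp [pyPartitionSemi]
  | succ fuel ih =>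
    intro l cur acc h
    cases l with
    | nil => rw [go_nil]; simp [pyPartitionSemi]
    | cons c rest =>
      simp only [List.length_cons, Nat.succ_le_succ_iff] at h
      rw [go_step]
      by_cases hc : c = ';'
      · subst hc
        rw [if_pos rfl, ih rest [] (cur.reverse :: acc) h]
        have hsplit : PySem.Chars.splitOn rest [';'] =
            (pyPartitionSemi rest).1 ::
              (if ';' ∈ rest then PySem.Chars.splitOn (pyPartitionSemi rest).2 [';'] else []) := by
          show PySem.Chars.splitOn.go [';'] (rest.length + 1) rest [] [] = _
          rw [go_fuel_irrel (rest.length + 1) fuel rest [] [] (by omega) h, ih rest [] [] h]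
          simp
        simp [pyPartitionSemi, hsplit]
      · rw [if_neg hc, ih rest (c :: cur) acc h]
        have hc' : ¬ (';' = c) := fun h => hc h.symm
        simp [pyPartitionSemi, hc, hc', List.mem_cons]

theorem splitOn_semi (t : List Char) :
    PySem.Chars.splitOn t [';'] =
      (pyPartitionSemi t).1 ::
        (if ';' ∈ t then PySem.Chars.splitOn (pyPartitionSemi t).2 [';'] else []) := by
  show PySem.Chars.splitOn.go [';'] (t.length + 1) t [] [] = _
  rw [go_partition (t.length + 1) t [] [] (by omega)]
  simp

theorem partition_no_semi (l : List Char) (h : ';' ∉ l) : pyPartitionSemi l = (l, []) := by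
  induction l with
  | nil => simp [pyPartitionSemi]
  | cons c rest ih =>
    simp only [List.mem_cons, not_or] at h
    simp [pyPartitionSemi, Ne.symm h.1, ih h.2]

-- in state k = 1 the loop collects exactly the part before the next ';'
theorem prcLoop_one : ∀ (l study analysis : List Char),
    prcLoop l 1 study analysis = (study, analysis ++ (pyPartitionSemi l).1) := by
  intro l
  induction l with
  | nil => intro s a; simp [prcLoop, pyPartitionSemi]
  | cons c rest ih =>
    intro s a
    by_cases hc : c = ';'
    · subst hc; simp [prcLoop, pyPartitionSemi]
    · simp [prcLoop, hc, pyPartitionSemi, ih]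

-- from the start the loop delivers the first two ';'-delimited fragments
theorem prcLoop_zero : ∀ (l study : List Char),
    prcLoop l 0 study [] =
      (study ++ (pyPartitionSemi l).1, (pyPartitionSemi (pyPartitionSemi l).2).1) := by
  intro l
  induction l with
  | nil => intro s; simp [prcLoop, pyPartitionSemi]
  | cons c rest ih =>
    intro s
    by_cases hc : c = ';'
    · subst hc; simp [prcLoop, pyPartitionSemi, prcLoop_one]
    · simp [prcLoop, hc, pyPartitionSemi, ih]

-- ===== VERDICT (by name: the statement is the Claim_ definition above) =====
theorem parse_reference_convention_spec : Claim_equal_parse_reference_convention := by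
  intro value _
  unfold Spec_parse_reference_convention parse_reference_convention parse_reference_convention_alt
  by_cases hempty : PySem.Str.strip value = ""
  · simp [hempty]
  · simp only [hempty, if_false]
    set t := (PySem.Str.strip value).toList with ht
    have hsplit? : PySem.Chars.split? t [';'] = some (PySem.Chars.splitOn t [';']) := by
      simp [PySem.Chars.split?]
    rw [hsplit?]
    simp only [Option.getD_some]
    rw [splitOn_semi t, prcLoop_zero t []]
    by_cases hmem : ';' ∈ t
    · simp only [hmem, if_pos]
      rw [splitOn_semi (pyPartitionSemi t).2]
      simp
    · rw [partition_no_semi (pyPartitionSemi t).2 (by simp [partition_no_semi t hmem])]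
      have : PySem.Chars.strip ([] : List Char) = [] := by decide
      simp [hmem, partition_no_semi t hmem, this]
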